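-- pv_equiv track=rewrite | github.com/Liorcicurel/Goldbach-s-conjecture | Goldbach's conjecture.py | check_goldbach_for_range
-- ===== SOURCE A (Python) =====
-- def check_goldbach_for_num(n, primes_set):
--     for m in primes_set:
--         if n-int(m) in primes_set:
--             return True
--     return False
--
-- def check_goldbach_for_range(limit, primes_set):
--     if limit == 3:
--         return True
--     else:
--         for a in range(4,limit,2):
--             check_goldbach_for_num(a,primes_set)
--             if check_goldbach_for_num(a,primes_set) is False:
--                 return False
--     return True
-- ===== SOURCE B (Python) =====
-- def check_goldbach_for_range(limit, primes_set):
--     sums = {m + t for m in primes_set for t in primes_set}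
--     a = 4
--     while a < limit:
--         if a not in sums:
--             return False
--         a += 2
--     return True
-- ===== Notes on version B (the rewrite author's own statement) =====
-- stated objective: alternative
-- what changed: B precomputes the set of all two-prime sums once and then sweeps the evens with a single membership test each, instead of rescanning the primes set for every even (and A's double helper call); the limit==3 special case disappears since the empty range yields True naturally.
import Mathlib
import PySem

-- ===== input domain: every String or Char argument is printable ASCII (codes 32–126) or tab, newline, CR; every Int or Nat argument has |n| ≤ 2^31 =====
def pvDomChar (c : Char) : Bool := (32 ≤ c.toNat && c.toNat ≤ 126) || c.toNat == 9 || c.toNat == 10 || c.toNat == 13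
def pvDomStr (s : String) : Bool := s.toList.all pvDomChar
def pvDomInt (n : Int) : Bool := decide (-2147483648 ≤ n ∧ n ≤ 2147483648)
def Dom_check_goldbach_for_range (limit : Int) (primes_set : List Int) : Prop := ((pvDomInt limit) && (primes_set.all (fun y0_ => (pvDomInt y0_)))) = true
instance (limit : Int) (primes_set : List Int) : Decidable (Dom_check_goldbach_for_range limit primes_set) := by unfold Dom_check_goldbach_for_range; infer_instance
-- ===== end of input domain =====

-- B builds the set of all two-prime sums once and sweeps the evens with one membership
-- test each, instead of rescanning the primes for every even; return values only.
-- (In both ports Python's lazy 'for a in range(4, limit, 2)' / 'while a < limit' is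
-- transcribed as the same counter recursion a → a + 2, not a materialized list.)

-- ===== PORT A =====
-- for m in primes_set: if n - int(m) in primes_set: return True; return False
-- (int(m) on an int is the identity)
def check_goldbach_for_num (n : Int) (primes_set : List Int) : Bool :=
  goldNumLoop n primes_set primes_set
where
  goldNumLoop (n : Int) (primes_set : List Int) : List Int → Bool
    | [] => false
    | m :: rest => if primes_set.contains (n - m) then true else goldNumLoop n primes_set rest

-- for a in range(4, limit, 2): call helper (discarded pure call), return False if helper is False
def check_goldbach_for_range (limit : Int) (primes_set : List Int) : Bool :=
  if limit == 3 then true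
  else goldRangeLoop primes_set limit 4
where
  goldRangeLoop (primes_set : List Int) (limit a : Int) : Bool :=
    if a < limit then
      let _ := check_goldbach_for_num a primes_set   -- A's first (discarded) call
      if check_goldbach_for_num a primes_set == false then false
      else goldRangeLoop primes_set limit (a + 2)
    else true
  termination_by (limit - a).toNat
  decreasing_by omega

-- ===== PORT B =====
-- sums = {m + t for m in primes_set for t in primes_set}
-- a = 4; while a < limit: if a not in sums: return False; a += 2; return True
def altSweep (sums : PySem.Set Int) (limit a : Int) : Bool :=
  if a < limit then
    if !(PySem.Set.contains sums a) then false
    else altSweep sums limit (a + 2)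
  else true
  termination_by (limit - a).toNat
  decreasing_by omega

def check_goldbach_for_range_alt (limit : Int) (primes_set : List Int) : Bool :=
  let sums : PySem.Set Int :=
    PySem.Set.ofList (primes_set.flatMap (fun m => primes_set.map (fun t => m + t)))
  altSweep sums limit 4

-- ===== PRECONDITION & SPEC =====
def Spec_check_goldbach_for_range (limit : Int) (primes_set : List Int) (out : Bool) : Prop := out = check_goldbach_for_range_alt limit primes_set
instance (limit : Int) (primes_set : List Int) (out : Bool) : Decidable (Spec_check_goldbach_for_range limit primes_set out) := by unfold Spec_check_goldbach_for_range; infer_instance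

-- ===== CLAIM (what is proved, stated in full; the proofs are below) =====
def Claim_equal_check_goldbach_for_range : Prop := ∀ (limit : Int) (primes_set : List Int), Dom_check_goldbach_for_range limit primes_set → Spec_check_goldbach_for_range limit primes_set (check_goldbach_for_range limit primes_set)

-- ===== LEMMAS AND PROOFS =====

-- A's inner loop is an existence test over the primes list
theorem goldNumLoop_eq_any (n : Int) (ps : List Int) :
    ∀ l, check_goldbach_for_num.goldNumLoop n ps l = l.any (fun m => ps.contains (n - m)) := by
  intro l
  induction l with
  | nil => rfl
  | cons m rest ih =>
    simp only [check_goldbach_for_num.goldNumLoop, List.any_cons, ih]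
    split_ifs with h
    · rw [(by simpa using h : ps.contains (n - m) = true), Bool.true_or]
    · rw [(by simpa using h : ps.contains (n - m) = false), Bool.false_or]

-- the helper decides membership of n in B's sum table
theorem num_eq_contains_sums (n : Int) (ps : List Int) :
    check_goldbach_for_num n ps =
      PySem.Set.contains (PySem.Set.ofList (ps.flatMap (fun m => ps.map (fun t => m + t)))) n := by
  rw [check_goldbach_for_num, goldNumLoop_eq_any, Bool.eq_iff_iff]
  simp only [List.any_eq_true, List.contains_eq_mem, decide_eq_true_eq, PySem.Set.contains_iff,
    PySem.Set.mem_ofList, List.mem_flatMap, List.mem_map]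
  constructor
  · rintro ⟨m, hm, hmem⟩
    exact ⟨m, hm, n - m, hmem, by ring⟩
  · rintro ⟨m, hm, t, ht, hsum⟩
    exact ⟨m, hm, by rw [← hsum]; simpa using ht⟩

-- A's sweep and B's sweep agree step for step
theorem goldRangeLoop_eq_altSweep (ps : List Int) (limit a : Int) :
    check_goldbach_for_range.goldRangeLoop ps limit a =
      altSweep (PySem.Set.ofList (ps.flatMap (fun m => ps.map (fun t => m + t)))) limit a := by
  fun_induction check_goldbach_for_range.goldRangeLoop ps limit a with
  | case1 a h hfalse =>
    rw [altSweep, if_pos h]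
    rw [beq_iff_eq, num_eq_contains_sums] at hfalse
    rw [hfalse]
    simp only [Bool.not_false, if_true]
  | case2 a h htrue ih =>
    rw [altSweep, if_pos h]
    rw [beq_iff_eq, num_eq_contains_sums] at htrue
    have hc : PySem.Set.contains (PySem.Set.ofList (ps.flatMap (fun m => ps.map (fun t => m + t)))) a = true := by
      cases h' : PySem.Set.contains (PySem.Set.ofList (ps.flatMap (fun m => ps.map (fun t => m + t)))) a
      · exact absurd h' htrue
      · rfl
    rw [hc]
    simp only [Bool.not_true, Bool.false_eq_true, if_false]
    exact ih
  | case3 a h =>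
    rw [altSweep, if_neg h]

-- ===== VERDICT (by name: the statement is the Claim_ definition above) =====
theorem check_goldbach_for_range_spec : Claim_equal_check_goldbach_for_range := by
  intro limit primes_set _
  unfold Spec_check_goldbach_for_range check_goldbach_for_range check_goldbach_for_range_alt
  split_ifs with h
  · have h3 : limit = 3 := by simpa using h
    subst h3
    rw [altSweep]
    norm_num
  · exact goldRangeLoop_eq_altSweep primes_set limit 4
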